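-- pv_equiv track=rewrite | github.com/ElToroDM/exerionbit-esp32c3-bootloader | scripts/validate_bootlog.py | check_recovery
-- ===== SOURCE A (Python) =====
-- def check_recovery(lines: list[str], allow_handoff_after_recovery: bool) -> tuple[bool, str]:
--     recovery_idx = next((i for i, line in enumerate(lines) if "BL_EVT:DECISION_RECOVERY" in line), -1)
--     if recovery_idx == -1:
--         return True, "Recovery path not observed in this log (non-blocking)."
--
--     handoff_after_recovery = any("BL_EVT:HANDOFF_APP" in line for line in lines[recovery_idx + 1 :])
--     if handoff_after_recovery and not allow_handoff_after_recovery: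
--         return False, "Recovery token observed but handoff occurred afterward in same trace."
--
--     if handoff_after_recovery and allow_handoff_after_recovery:
--         return True, "Recovery token observed with later handoff (allowed by profile)."
--
--     return True, "Recovery path observed without app handoff."
-- ===== SOURCE B (Python) =====
-- def check_recovery(lines: list[str], allow_handoff_after_recovery: bool) -> tuple[bool, str]:
--     # Reverse scan: a handoff at index j counts for a recovery at index i iff i < j.
--     # The first recovery has a later handoff iff ANY recovery line has a later handoff,
--     # so one backward pass tracking "handoff seen strictly below" suffices.
--     recovery_seen = False
--     handoff_after = False
--     handoff_below = False
--     for line in reversed(lines):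
--         if "BL_EVT:DECISION_RECOVERY" in line:
--             recovery_seen = True
--             if handoff_below:
--                 handoff_after = True
--         if "BL_EVT:HANDOFF_APP" in line:
--             handoff_below = True
--     if not recovery_seen:
--         return True, "Recovery path not observed in this log (non-blocking)."
--     if handoff_after and not allow_handoff_after_recovery:
--         return False, "Recovery token observed but handoff occurred afterward in same trace."
--     if handoff_after:
--         return True, "Recovery token observed with later handoff (allowed by profile)."
--     return True, "Recovery path observed without app handoff."
-- ===== Notes on version B (the rewrite author's own statement) =====
-- stated objective: alternative
-- what changed: Replaced A's forward find-first-recovery-index plus second scan of the suffix slice by a single backward pass over reversed(lines) tracking whether a handoff line exists strictly below each recovery line, which is correct because the first recovery has a later handoff iff any recovery does.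
import Mathlib
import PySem

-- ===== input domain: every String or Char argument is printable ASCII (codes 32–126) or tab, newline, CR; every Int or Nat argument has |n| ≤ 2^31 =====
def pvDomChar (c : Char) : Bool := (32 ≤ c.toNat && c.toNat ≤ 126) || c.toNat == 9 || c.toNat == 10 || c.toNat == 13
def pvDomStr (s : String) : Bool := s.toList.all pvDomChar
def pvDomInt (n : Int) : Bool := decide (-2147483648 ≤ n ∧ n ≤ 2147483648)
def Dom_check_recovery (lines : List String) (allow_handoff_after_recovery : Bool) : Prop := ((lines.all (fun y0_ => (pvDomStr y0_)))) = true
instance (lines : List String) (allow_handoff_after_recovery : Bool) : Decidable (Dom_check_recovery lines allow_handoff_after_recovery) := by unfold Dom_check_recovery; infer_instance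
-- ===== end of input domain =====

-- B replaces A's forward find-index-then-scan-suffix by one backward pass over the
-- reversed log tracking a "handoff strictly below" flag (alternative decomposition).

-- ===== PORT A =====
-- "BL_EVT:DECISION_RECOVERY" in line  /  "BL_EVT:HANDOFF_APP" in line
def pvHasRec (line : String) : Bool := PySem.Str.isIn "BL_EVT:DECISION_RECOVERY" line
def pvHasHand (line : String) : Bool := PySem.Str.isIn "BL_EVT:HANDOFF_APP" line

-- next((i for i, line in enumerate(lines) if "BL_EVT:DECISION_RECOVERY" in line), -1)
def pvFirstRecoveryIdx : List String → Int
  | [] => -1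
  | l :: ls =>
    if pvHasRec l then 0
    else
      let r := pvFirstRecoveryIdx ls
      if r = -1 then -1 else r + 1

def check_recovery (lines : List String) (allow_handoff_after_recovery : Bool) : Bool × String :=
  let recovery_idx := pvFirstRecoveryIdx lines
  if recovery_idx = -1 then
    (true, "Recovery path not observed in this log (non-blocking).")
  else
    let handoff_after_recovery :=
      (PySem.List.slice lines (some (recovery_idx + 1)) none).any pvHasHand
    if handoff_after_recovery && !allow_handoff_after_recovery then
      (false, "Recovery token observed but handoff occurred afterward in same trace.")
    else if handoff_after_recovery && allow_handoff_after_recovery then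
      (true, "Recovery token observed with later handoff (allowed by profile).")
    else
      (true, "Recovery path observed without app handoff.")

-- ===== PORT B =====
-- loop body over reversed(lines): state = (recovery_seen, handoff_after, handoff_below)
def pvRStep (st : Bool × Bool × Bool) (line : String) : Bool × Bool × Bool :=
  let st1 := if pvHasRec line then (true, st.2.1 || st.2.2, st.2.2) else st
  if pvHasHand line then (st1.1, st1.2.1, true) else st1

def check_recovery_alt (lines : List String) (allow_handoff_after_recovery : Bool) : Bool × String :=
  let st := lines.reverse.foldl pvRStep (false, false, false)
  if !st.1 then
    (true, "Recovery path not observed in this log (non-blocking).")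
  else if st.2.1 && !allow_handoff_after_recovery then
    (false, "Recovery token observed but handoff occurred afterward in same trace.")
  else if st.2.1 then
    (true, "Recovery token observed with later handoff (allowed by profile).")
  else
    (true, "Recovery path observed without app handoff.")

-- ===== PRECONDITION & SPEC =====
def Spec_check_recovery (lines : List String) (allow_handoff_after_recovery : Bool) (out : Bool × String) : Prop := out = check_recovery_alt lines allow_handoff_after_recovery
instance (lines : List String) (allow_handoff_after_recovery : Bool) (out : Bool × String) : Decidable (Spec_check_recovery lines allow_handoff_after_recovery out) := by unfold Spec_check_recovery; infer_instance

-- ===== CLAIM (what is proved, stated in full; the proofs are below) =====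
def Claim_equal_check_recovery : Prop := ∀ (lines : List String) (allow_handoff_after_recovery : Bool), Dom_check_recovery lines allow_handoff_after_recovery → Spec_check_recovery lines allow_handoff_after_recovery (check_recovery lines allow_handoff_after_recovery)

-- ===== LEMMAS AND PROOFS =====

-- "some recovery line has a handoff line strictly after it"
def pvP : List String → Bool
  | [] => false
  | l :: ls => (pvHasRec l && ls.any pvHasHand) || pvP ls

-- characterisation of B's backward fold
theorem pvRStep_char (ls : List String) :
    ls.reverse.foldl pvRStep (false, false, false)
      = (ls.any pvHasRec, pvP ls, ls.any pvHasHand) := by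
  rw [List.foldl_reverse]
  induction ls with
  | nil => rfl
  | cons l ls ih =>
    rw [List.foldr_cons, ih]
    simp only [pvRStep, pvP, List.any_cons]
    cases hR : pvHasRec l <;> cases hH : pvHasHand l <;>
      simp [Bool.or_comm]

theorem pvP_imp_hand (ls : List String) (h : pvP ls = true) : ls.any pvHasHand = true := by
  induction ls with
  | nil => simp [pvP] at h
  | cons l ls ih =>
    simp only [pvP, Bool.or_eq_true, Bool.and_eq_true] at h
    rcases h with ⟨_, h⟩ | h
    · simp [List.any_cons, h]
    · simp [List.any_cons, ih h]

-- the first-index helper returns -1 or a natural number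
theorem idx_nonneg (ls : List String) (h : pvFirstRecoveryIdx ls ≠ -1) :
    ∃ k : Nat, pvFirstRecoveryIdx ls = (k : Int) := by
  induction ls with
  | nil => simp [pvFirstRecoveryIdx] at h
  | cons l ls ih =>
    by_cases hR : pvHasRec l = true
    · exact ⟨0, by simp [pvFirstRecoveryIdx, hR]⟩
    · simp only [Bool.not_eq_true] at hR
      simp only [pvFirstRecoveryIdx, hR, Bool.false_eq_true, if_false] at h ⊢
      by_cases hr : pvFirstRecoveryIdx ls = -1
      · simp [hr] at h
      · obtain ⟨k, hk⟩ := ih hr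
        exact ⟨k + 1, by rw [if_neg hr, hk]; push_cast; ring⟩

theorem check_recovery_eq (lines : List String) (allow : Bool) :
    check_recovery lines allow = check_recovery_alt lines allow := by
  induction lines with
  | nil => rfl
  | cons l ls ih =>
    by_cases hR : pvHasRec l = true
    · -- head is the first recovery line: A scans lines[1:]
      have hidx : pvFirstRecoveryIdx (l :: ls) = 0 := by simp [pvFirstRecoveryIdx, hR]
      have hsl : PySem.List.slice (l :: ls) (some ((0 : Int) + 1)) none = ls := by
        have h1 : ((0 : Int) + 1) = 1 := by norm_num
        rw [h1, PySem.List.slice_from_one]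
        rfl
      have hP : pvP (l :: ls) = ls.any pvHasHand := by
        simp only [pvP, hR, Bool.true_and]
        cases hp : pvP ls
        · simp
        · simp [pvP_imp_hand ls hp]
      simp only [check_recovery, check_recovery_alt, hidx, hsl, pvRStep_char,
        List.any_cons, hR, Bool.true_or, hP]
      cases hA : ls.any pvHasHand <;> cases allow <;> simp
    · simp only [Bool.not_eq_true] at hR
      have hP : pvP (l :: ls) = pvP ls := by simp [pvP, hR]
      have hB : check_recovery_alt (l :: ls) allow = check_recovery_alt ls allow := by
        simp only [check_recovery_alt, pvRStep_char, List.any_cons, hR, Bool.false_or, hP]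
      by_cases hr : pvFirstRecoveryIdx ls = -1
      · -- no recovery anywhere
        have hidx' : pvFirstRecoveryIdx (l :: ls) = -1 := by
          simp [pvFirstRecoveryIdx, hR, hr]
        have hr' : pvFirstRecoveryIdx ls = -1 := hr
        rw [hB, ← ih]
        simp [check_recovery, hidx', hr']
      · -- recovery is in the tail: A on (l :: ls) reduces to A on ls
        obtain ⟨k, hk⟩ := idx_nonneg ls hr
        have hidx' : pvFirstRecoveryIdx (l :: ls) = pvFirstRecoveryIdx ls + 1 := by
          simp [pvFirstRecoveryIdx, hR, hr]
        have hA : check_recovery (l :: ls) allow = check_recovery ls allow := by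
          have h1 : PySem.List.slice (l :: ls) (some (((k : Int) + 1) + 1)) none
              = PySem.List.slice ls (some ((k : Int) + 1)) none := by
            have e1 : ((k : Int) + 1) + 1 = ((k + 2 : Nat) : Int) := by push_cast; ring
            have e2 : ((k : Int) + 1) = ((k + 1 : Nat) : Int) := by push_cast; ring
            rw [e1, e2, PySem.List.slice_from_natCast, PySem.List.slice_from_natCast]
            rfl
          simp only [check_recovery, hidx', hk, h1]
          simp [show ¬((k : Int) + 1 = -1) by omega, show ¬((k : Int) = -1) by omega]
        rw [hA, ih, hB]

-- ===== VERDICT (by name: the statement is the Claim_ definition above) =====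
theorem check_recovery_spec : Claim_equal_check_recovery := by
  intro lines allow _
  unfold Spec_check_recovery
  exact check_recovery_eq lines allow
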